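-- pv_equiv track=rewrite | github.com/Neoooou/CLC_Chatbot | chatbot/combinedmodel/topicpreprocessing.py | _build_dictionarys
-- ===== SOURCE A (Python) =====
-- def _build_dictionarys(topics):
--     num_topics = len(set(topics))
--     dictionary = {}
--     reverse_dictionary = {}
--     counter = 0
--     for topic in topics:
--         if topic not in dictionary.keys():
--             dictionary[topic] = counter
--             reverse_dictionary[counter] = topic
--             counter += 1
--
--     return dictionary, reverse_dictionary, num_topics
-- ===== SOURCE B (Python) =====
-- def _build_dictionarys(topics):
--     first = {t: i for i, t in reversed(list(enumerate(topics)))}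
--     unique = sorted(set(topics), key=lambda t: first[t])
--     n = len(unique)
--     dictionary = dict(zip(unique, range(n)))
--     reverse_dictionary = dict(zip(range(n), unique))
--     return dictionary, reverse_dictionary, n
-- ===== Notes on version B (the rewrite author's own statement) =====
-- stated objective: alternative
-- what changed: Instead of one guarded pass with a manual counter and membership test, B maps each topic to its first-occurrence position (last-write-wins over the reversed enumeration), dedups with an unordered set, recovers first-occurrence order by sorting on that position, and builds both dicts with dict(zip(...)).
import Mathlib
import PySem

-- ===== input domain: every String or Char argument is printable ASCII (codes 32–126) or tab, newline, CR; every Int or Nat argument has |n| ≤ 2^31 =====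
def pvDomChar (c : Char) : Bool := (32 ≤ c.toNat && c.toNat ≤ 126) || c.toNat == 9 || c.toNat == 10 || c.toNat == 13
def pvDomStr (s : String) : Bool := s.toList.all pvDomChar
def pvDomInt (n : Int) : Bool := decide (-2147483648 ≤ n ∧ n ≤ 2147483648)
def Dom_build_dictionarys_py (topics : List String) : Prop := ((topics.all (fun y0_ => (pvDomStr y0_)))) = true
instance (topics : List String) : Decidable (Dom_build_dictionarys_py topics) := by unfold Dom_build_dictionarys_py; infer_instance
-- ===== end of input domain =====

-- B replaces A's guarded single pass (membership test + manual counter) by a first-occurrence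
-- position map (last-write-wins over the reversed enumeration), set-dedup, a sort by that
-- position, and dict(zip(...)); objective: alternative pipeline, same results.

-- ===== PORT A =====
def build_dictionarys_py (topics : List String) : (List (String × Int)) × (List (Int × String)) × Int :=
  let num_topics : Int := (PySem.Set.ofList topics).length
  let st := topics.foldl
    (fun (s : PySem.Dict String Int × PySem.Dict Int String × Int) topic =>
      if s.1.keys.contains topic then s
      else (s.1.insert topic s.2.2, s.2.1.insert s.2.2 topic, s.2.2 + 1))
    (PySem.Dict.empty, PySem.Dict.empty, 0)
  (st.1.items, st.2.1.items, num_topics)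

-- ===== PORT B =====
-- first[t] never raises here: every sorted element is drawn from topics, so the
-- '.getD 0' default is unreachable (it only totalises the key).
def build_dictionarys_py_alt (topics : List String) : (List (String × Int)) × (List (Int × String)) × Int :=
  let first := ((PySem.List.enumerate topics 0).reverse).foldl
    (fun (d : PySem.Dict String Int) p => d.insert p.2 p.1) PySem.Dict.empty
  let unique := PySem.List.sorted (PySem.Set.ofList topics)
    (fun t => (first.get? t).getD 0) false
  let n := unique.length
  let rng := PySem.List.pyRange 0 (n : Int) 1
  let dictionary := (unique.zip rng).foldl
    (fun (d : PySem.Dict String Int) p => d.insert p.1 p.2) PySem.Dict.empty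
  let reverse_dictionary := (rng.zip unique).foldl
    (fun (d : PySem.Dict Int String) p => d.insert p.1 p.2) PySem.Dict.empty
  (dictionary.items, reverse_dictionary.items, (n : Int))

-- ===== PRECONDITION & SPEC =====
def Spec_build_dictionarys_py (topics : List String) (out : (List (String × Int)) × (List (Int × String)) × Int) : Prop := out = build_dictionarys_py_alt topics
instance (topics : List String) (out : (List (String × Int)) × (List (Int × String)) × Int) : Decidable (Spec_build_dictionarys_py topics out) := by unfold Spec_build_dictionarys_py; infer_instance

-- ===== CLAIM (what is proved, stated in full; the proofs are below) =====
def Claim_equal_build_dictionarys_py : Prop := ∀ (topics : List String), Dom_build_dictionarys_py topics → Spec_build_dictionarys_py topics (build_dictionarys_py topics)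

-- ===== LEMMAS AND PROOFS =====

-- the forward dict A has built after its unique-prefix is u
def pvFwd (u : List String) : PySem.Dict String Int :=
  PySem.Dict.mk ((PySem.List.enumerate u 0).map (fun p => (p.2, p.1)))

-- the reverse dict A has built after its unique-prefix is u
def pvRev (u : List String) : PySem.Dict Int String :=
  PySem.Dict.mk (PySem.List.enumerate u 0)

lemma pvFwd_keys (u : List String) : (pvFwd u).keys = u := by
  simp only [pvFwd, PySem.Dict.keys, List.map_map]
  exact PySem.List.map_snd_enumerate u 0

lemma pvRev_keys (u : List String) : (pvRev u).keys = (PySem.List.enumerate u 0).map (·.1) := by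
  simp [pvRev, PySem.Dict.keys]

lemma pvRev_not_contains (u : List String) : (pvRev u).contains (u.length : Int) = false := by
  rw [PySem.Dict.contains_eq_decide_mem_keys, pvRev_keys]
  simp only [decide_eq_false_iff_not, List.mem_map]
  rintro ⟨p, hp, hfst⟩
  rcases (PySem.List.mem_enumerate_iff _ _ _).mp hp with ⟨k, hk, rfl⟩
  simp at hfst
  omega

lemma pvFwd_step (u : List String) (t : String) (h : t ∉ u) :
    (pvFwd u).insert t (u.length : Int) = pvFwd (u ++ [t]) := by
  apply PySem.Dict.ext
  rw [PySem.Dict.items_insert_of_not_contains]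
  · simp [pvFwd, PySem.List.enumerate_append, PySem.List.enumerate_cons,
      PySem.List.enumerate_nil]
  · rw [PySem.Dict.contains_eq_decide_mem_keys, pvFwd_keys]
    simpa using h

lemma pvRev_step (u : List String) (t : String) :
    (pvRev u).insert (u.length : Int) t = pvRev (u ++ [t]) := by
  apply PySem.Dict.ext
  rw [PySem.Dict.items_insert_of_not_contains]
  · simp [pvRev, PySem.List.enumerate_append, PySem.List.enumerate_cons,
      PySem.List.enumerate_nil]
  · exact pvRev_not_contains u

lemma pvLoopA (ts u : List String) :
    ts.foldl
      (fun (s : PySem.Dict String Int × PySem.Dict Int String × Int) topic =>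
        if s.1.keys.contains topic then s
        else (s.1.insert topic s.2.2, s.2.1.insert s.2.2 topic, s.2.2 + 1))
      (pvFwd u, pvRev u, (u.length : Int)) =
    (pvFwd (PySem.Set.update u ts), pvRev (PySem.Set.update u ts),
      ((PySem.Set.update u ts).length : Int)) := by
  induction ts generalizing u with
  | nil => simp [PySem.Set.update]
  | cons t ts ih =>
    have hupd : PySem.Set.update u (t :: ts) = PySem.Set.update (PySem.Set.add u t) ts := by
      simp [PySem.Set.update]
    rw [List.foldl_cons, hupd]
    by_cases hmem : t ∈ u
    · have hadd : PySem.Set.add u t = u := by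
        simp [PySem.Set.add, PySem.Set.contains, hmem]
      rw [hadd]
      have hred : (if (pvFwd u).keys.contains t then
          ((pvFwd u, pvRev u, (u.length : Int)) :
            PySem.Dict String Int × PySem.Dict Int String × Int)
        else ((pvFwd u).insert t (u.length : Int),
              (pvRev u).insert (u.length : Int) t, (u.length : Int) + 1)) =
          (pvFwd u, pvRev u, (u.length : Int)) := by
        simp [pvFwd_keys, hmem]
      rw [hred]
      exact ih u
    · have hadd : PySem.Set.add u t = u ++ [t] := by
        simp [PySem.Set.add, PySem.Set.contains, hmem]
      rw [hadd]
      have hred : (if (pvFwd u).keys.contains t then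
          ((pvFwd u, pvRev u, (u.length : Int)) :
            PySem.Dict String Int × PySem.Dict Int String × Int)
        else ((pvFwd u).insert t (u.length : Int),
              (pvRev u).insert (u.length : Int) t, (u.length : Int) + 1)) =
          (pvFwd (u ++ [t]), pvRev (u ++ [t]), ((u ++ [t]).length : Int)) := by
        rw [pvFwd_step u t hmem, pvRev_step u t]
        simp [pvFwd_keys, hmem]
      rw [hred]
      exact ih (u ++ [t])

lemma pvFwd_nil : pvFwd [] = PySem.Dict.empty := by
  simp [pvFwd, PySem.List.enumerate_nil, PySem.Dict.empty]

lemma pvRev_nil : pvRev [] = PySem.Dict.empty := by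
  simp [pvRev, PySem.List.enumerate_nil, PySem.Dict.empty]

-- set(topics) in first-occurrence order is strictly increasing under topics.index,
-- hence it is its own sort by that key
lemma pvOfList_pairwise_index (topics : List String) :
    (PySem.Set.ofList topics).Pairwise
      (fun a b => ((PySem.List.index? topics a).getD 0 : Nat) <
                  ((PySem.List.index? topics b).getD 0 : Nat)) := by
  induction topics using List.reverseRecOn with
  | nil => simp [PySem.Set.ofList_nil]
  | append_singleton xs x ih =>
    rw [PySem.Set.ofList_append_singleton]
    by_cases hmem : x ∈ xs
    · have hadd : PySem.Set.add (PySem.Set.ofList xs) x = PySem.Set.ofList xs := by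
        simp [PySem.Set.add, PySem.Set.contains, PySem.Set.mem_ofList, hmem]
      rw [hadd]
      refine ih.imp_of_mem ?_
      intro a b ha hb hab
      rw [PySem.List.index?_append_of_mem _ ((PySem.Set.mem_ofList _ _).mp ha),
          PySem.List.index?_append_of_mem _ ((PySem.Set.mem_ofList _ _).mp hb)]
      exact hab
    · have hadd : PySem.Set.add (PySem.Set.ofList xs) x = PySem.Set.ofList xs ++ [x] := by
        simp [PySem.Set.add, PySem.Set.contains, PySem.Set.mem_ofList, hmem]
      rw [hadd, List.pairwise_append]
      refine ⟨ih.imp_of_mem ?_, by simp, ?_⟩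
      · intro a b ha hb hab
        rw [PySem.List.index?_append_of_mem _ ((PySem.Set.mem_ofList _ _).mp ha),
            PySem.List.index?_append_of_mem _ ((PySem.Set.mem_ofList _ _).mp hb)]
        exact hab
      · intro a ha b hb
        simp only [List.mem_singleton] at hb
        subst hb
        have ha' : a ∈ xs := (PySem.Set.mem_ofList _ _).mp ha
        rw [PySem.List.index?_append_of_mem _ ha',
            PySem.List.index?_append_singleton_self xs b hmem]
        rcases Option.isSome_iff_exists.mp ((PySem.List.index?_isSome_iff xs a).mpr ha')
          with ⟨k, hk⟩
        rcases (PySem.List.index?_eq_some_iff _ _ _).mp hk with ⟨pre, suf, hxs, hlen, -⟩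
        have : k < xs.length := by
          rw [hxs]; simp [← hlen]
        rw [PySem.List.index?_eq_idxOf?] at hk
        simp [hk, this]

-- the first-occurrence dict of B: looked up at a member, it returns s + first index
lemma pvFirst (xs : List String) (s : Int) (d : PySem.Dict String Int) (v : String)
    (hv : v ∈ xs) :
    (((PySem.List.enumerate xs s).reverse).foldl
      (fun (d : PySem.Dict String Int) p => d.insert p.2 p.1) d).get? v =
      (PySem.List.index? xs v).map (fun k => s + (k : Int)) := by
  induction xs generalizing s d with
  | nil => cases hv
  | cons x xs ih =>
    rw [PySem.List.enumerate_cons, List.reverse_cons, List.foldl_append]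
    simp only [List.foldl_cons, List.foldl_nil]
    by_cases hvx : v = x
    · subst hvx
      rw [PySem.Dict.get?_insert_self, PySem.List.index?_cons_self]
      simp
    · rw [PySem.Dict.get?_insert_of_ne _ _ hvx]
      have hv' : v ∈ xs := by
        rcases List.mem_cons.mp hv with h | h
        · exact absurd h hvx
        · exact h
      have hne : x ≠ v := fun h => hvx h.symm
      rcases Option.isSome_iff_exists.mp ((PySem.List.index?_isSome_iff xs v).mpr hv')
        with ⟨k, hk⟩
      rw [ih (s + 1) d hv', PySem.List.index?_cons_of_ne xs hne, hk]
      simp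
      ring

lemma pvSorted_eq (topics : List String) :
    PySem.List.sorted (PySem.Set.ofList topics)
      (fun t => ((((PySem.List.enumerate topics 0).reverse).foldl
        (fun (d : PySem.Dict String Int) p => d.insert p.2 p.1)
        PySem.Dict.empty).get? t).getD 0) false = PySem.Set.ofList topics := by
  apply PySem.List.sorted_eq_of_perm_of_pairwise_lt (PySem.Set.ofList topics)
    (PySem.Set.ofList topics) _ (List.Perm.refl _)
  refine (pvOfList_pairwise_index topics).imp_of_mem ?_
  intro a b ha hb hab
  have ha' : a ∈ topics := (PySem.Set.mem_ofList _ _).mp ha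
  have hb' : b ∈ topics := (PySem.Set.mem_ofList _ _).mp hb
  rw [pvFirst topics 0 PySem.Dict.empty a ha', pvFirst topics 0 PySem.Dict.empty b hb']
  rcases Option.isSome_iff_exists.mp ((PySem.List.index?_isSome_iff topics a).mpr ha')
    with ⟨ka, hka⟩
  rcases Option.isSome_iff_exists.mp ((PySem.List.index?_isSome_iff topics b).mpr hb')
    with ⟨kb, hkb⟩
  rw [hka, hkb] at hab ⊢
  simpa using hab

-- zip(range(n), xs) is enumerate(xs)
lemma pvRangeZip (xs : List String) (s : Int) :
    (PySem.List.pyRange s (s + xs.length) 1).zip xs = PySem.List.enumerate xs s := by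
  induction xs generalizing s with
  | nil => simp [PySem.List.enumerate_nil]
  | cons x xs ih =>
    have hlt : s < s + (x :: xs).length := by simp
    rw [PySem.List.pyRange_one_cons hlt]
    have harr : s + ((x :: xs).length : Int) = (s + 1) + xs.length := by
      simp only [List.length_cons]; push_cast; ring
    rw [harr]
    simp only [List.zip_cons_cons, PySem.List.enumerate_cons, ih (s + 1)]

lemma pvZipRange (xs : List String) (s : Int) :
    xs.zip (PySem.List.pyRange s (s + xs.length) 1) =
      (PySem.List.enumerate xs s).map (fun p => (p.2, p.1)) := by
  induction xs generalizing s with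
  | nil => simp [PySem.List.enumerate_nil]
  | cons x xs ih =>
    have hlt : s < s + (x :: xs).length := by simp
    rw [PySem.List.pyRange_one_cons hlt]
    have harr : s + ((x :: xs).length : Int) = (s + 1) + xs.length := by
      simp only [List.length_cons]; push_cast; ring
    rw [harr]
    simp only [List.zip_cons_cons, PySem.List.enumerate_cons, List.map_cons, ih (s + 1)]

lemma pvAltFwdItems (u : List String) (hnd : u.Nodup) :
    (((PySem.List.enumerate u 0).map (fun p => (p.2, p.1))).foldl
      (fun (d : PySem.Dict String Int) p => d.insert p.1 p.2) PySem.Dict.empty).items =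
      (pvFwd u).items := by
  have h2 : (((PySem.List.enumerate u 0).map (fun p => (p.2, p.1))).map
      (fun (p : String × Int) => p.1)).Nodup := by
    simp only [List.map_map]
    have he : ((fun (p : String × Int) => p.1) ∘ fun (p : Int × String) => (p.2, p.1)) =
        (fun (p : Int × String) => p.2) := rfl
    rw [he, PySem.List.map_snd_enumerate]
    exact hnd
  have h := PySem.Dict.items_foldl_insert_fresh
    ((PySem.List.enumerate u 0).map (fun p => (p.2, p.1)))
    (fun p => p.1) (fun p => p.2) PySem.Dict.empty
    (fun a _ => PySem.Dict.contains_empty _) h2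
  simpa [pvFwd, PySem.Dict.empty] using h

lemma pvAltRevItems (u : List String) :
    ((PySem.List.enumerate u 0).foldl
      (fun (d : PySem.Dict Int String) p => d.insert p.1 p.2) PySem.Dict.empty).items =
      (pvRev u).items := by
  have h2 : ((PySem.List.enumerate u 0).map (fun (p : Int × String) => p.1)).Nodup := by
    rw [PySem.List.map_fst_enumerate]
    exact PySem.List.nodup_pyRange_one _ _
  have h := PySem.Dict.items_foldl_insert_fresh (PySem.List.enumerate u 0)
    (fun p => p.1) (fun p => p.2) PySem.Dict.empty
    (fun a _ => PySem.Dict.contains_empty _) h2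
  simpa [pvRev, PySem.Dict.empty] using h

-- ===== VERDICT (by name: the statement is the Claim_ definition above) =====
theorem build_dictionarys_py_spec : Claim_equal_build_dictionarys_py := by
  intro topics _
  unfold Spec_build_dictionarys_py build_dictionarys_py build_dictionarys_py_alt
  dsimp only
  have h := pvLoopA topics []
  rw [pvFwd_nil, pvRev_nil] at h
  have hu : PySem.Set.update [] topics = PySem.Set.ofList topics := by
    simp [PySem.Set.update, PySem.Set.ofList_eq_foldl]
  rw [hu] at h
  simp only [List.length_nil, Nat.cast_zero] at h
  rw [pvSorted_eq]
  have hz1 := pvZipRange (PySem.Set.ofList topics) 0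
  have hz2 := pvRangeZip (PySem.Set.ofList topics) 0
  simp only [zero_add] at hz1 hz2
  simp only [h, hz1, hz2, pvAltRevItems]
  rw [pvAltFwdItems _ (PySem.Set.nodup_ofList topics)]
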